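-- pv_equiv track=rewrite | github.com/mikamo3/python_sandbox | atcoder/abc256/batters.py | func
-- ===== SOURCE A (Python) =====
-- from typing import List
--
-- def func(n: int, a: List[int]):
--     """
--     >>> func(4,[1,1,3,2])
--     3
--     >>> func(10,[2,2,4,1,1,1,4,2,2,1])
--     8
--     """
--     ans = 0
--     for x in range(n):
--         sum = 0
--         for y in range(x, n):
--             sum = sum+a[y]
--             if sum >= 4:
--                 ans = ans+1
--                 break
--     return ans
-- ===== SOURCE B (Python) =====
-- def func(n, a):
--     # Backward Kadane-style pass: t = max over y>=x of a[x]+...+a[y] (clamped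
--     # recurrence t = a[x] + max(0, t)); x is counted iff that maximum reaches 4,
--     # which is exactly when A's inner scan from x ever reaches a running sum >= 4.
--     ans = 0
--     t = 0
--     for x in range(n - 1, -1, -1):
--         t = a[x] + (t if t > 0 else 0)
--         if t >= 4:
--             ans += 1
--     return ans
-- ===== Notes on version B (the rewrite author's own statement) =====
-- stated objective: faster
-- what changed: Replaced the O(n^2) restart-at-every-x inner scan by a single backward Kadane-style pass maintaining the clamped best forward sum t = a[x] + max(0, t), counting x whenever t >= 4.
import Mathlib
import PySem

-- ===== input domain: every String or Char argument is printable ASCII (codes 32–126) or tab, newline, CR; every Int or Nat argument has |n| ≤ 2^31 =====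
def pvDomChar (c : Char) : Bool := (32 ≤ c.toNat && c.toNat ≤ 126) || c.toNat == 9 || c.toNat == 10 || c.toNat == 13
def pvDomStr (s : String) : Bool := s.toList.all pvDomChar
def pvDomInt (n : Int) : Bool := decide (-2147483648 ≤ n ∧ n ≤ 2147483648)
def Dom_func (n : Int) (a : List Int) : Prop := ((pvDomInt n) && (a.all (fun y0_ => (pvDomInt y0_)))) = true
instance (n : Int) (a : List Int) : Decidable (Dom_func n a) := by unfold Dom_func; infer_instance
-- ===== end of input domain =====

-- B replaces A's quadratic restart-at-every-x inner scan by one backward Kadane-style pass (objective: faster, asymptotic).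

-- ===== PORT A =====
-- inner 'for y in range(x, n)' loop with its running sum and the break;
-- a[y] is ported as pyGetD (in range under Pre_func, which excludes the IndexError inputs)
def funcInner (a : List Int) : List Int → Int → Int → Int
  | [], _, ans => ans
  | y :: rest, s, ans =>
    let s' := s + PySem.List.pyGetD a y 0
    if 4 ≤ s' then ans + 1 else funcInner a rest s' ans

def func (n : Int) (a : List Int) : Int :=
  (PySem.List.pyRange 0 n 1).foldl (fun ans x => funcInner a (PySem.List.pyRange x n 1) 0 ans) 0

-- ===== PORT B =====
def func_alt (n : Int) (a : List Int) : Int :=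
  ((PySem.List.pyRange (n - 1) (-1) (-1)).foldl
    (fun (p : Int × Int) x =>
      let t := PySem.List.pyGetD a x 0 + (if 0 < p.2 then p.2 else 0)
      (p.1 + (if 4 ≤ t then 1 else 0), t))
    (0, 0)).1

-- ===== PRECONDITION & SPEC =====
-- Pre_ excludes exactly the inputs where A raises IndexError: n larger than len(a)
def Pre_func (n : Int) (a : List Int) : Prop := n ≤ (a.length : Int)
instance (n : Int) (a : List Int) : Decidable (Pre_func n a) := by unfold Pre_func; infer_instance
def pvWitness_func : Int × List Int := (4, [1, 1, 3, 2])

def Spec_func (n : Int) (a : List Int) (out : Int) : Prop := out = func_alt n a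
instance (n : Int) (a : List Int) (out : Int) : Decidable (Spec_func n a out) := by unfold Spec_func; infer_instance

-- ===== CLAIM (what is proved, stated in full; the proofs are below) =====
def Claim_equal_func : Prop := ∀ (n : Int) (a : List Int), Dom_func n a → Pre_func n a → Spec_func n a (func n a)

-- ===== LEMMAS AND PROOFS =====

-- reference quantities the two ports are related to
def inner1 : List Int → Int → Int
  | [], _ => 0
  | y :: r, s => if 4 ≤ s + y then 1 else inner1 r (s + y)

def kad : List Int → Int
  | [] => 0
  | y :: r => y + (if 0 < kad r then kad r else 0)

def ind (l : List Int) : Int := if l ≠ [] ∧ 4 ≤ kad l then 1 else 0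

theorem funcInner_add (a : List Int) (ys : List Int) (s ans : Int) :
    funcInner a ys s ans = ans + funcInner a ys s 0 := by
  induction ys generalizing s with
  | nil => simp [funcInner]
  | cons y r ih =>
    simp only [funcInner]
    split_ifs with h
    · omega
    · exact ih _

theorem funcInner_eq_inner1 (a : List Int) (ys : List Int) (s : Int) :
    funcInner a ys s 0 = inner1 (ys.map (fun j => PySem.List.pyGetD a j 0)) s := by
  induction ys generalizing s with
  | nil => simp [funcInner, inner1]
  | cons y r ih =>
    simp only [funcInner, List.map_cons, inner1]
    split_ifs with h
    · rfl
    · exact ih _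

theorem inner1_eq_ind (l : List Int) (s : Int) :
    inner1 l s = if l ≠ [] ∧ 4 ≤ s + kad l then 1 else 0 := by
  induction l generalizing s with
  | nil => simp [inner1]
  | cons y r ih =>
    simp only [inner1, kad, ih]
    rcases r with _ | ⟨z, r'⟩
    · simp only [kad]
      split_ifs <;> simp_all <;> try omega
    · split_ifs <;> simp_all <;> try omega

-- the mapped index range over a equals a suffix of b = a.take m
theorem map_pyGetD_eq_drop (a : List Int) (m x : Nat) (hm : m ≤ a.length) (_hx : x ≤ m) :
    (PySem.List.pyRange (x : Int) (m : Int) 1).map (fun j => PySem.List.pyGetD a j 0)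
      = (a.take m).drop x := by
  have hlen : (a.take m).length = m := by simp [List.length_take]; omega
  have h1 := PySem.List.map_pyGetD_pyRange' (a.take m) (0 : Int) (a := (x : Int))
    (Int.natCast_nonneg x)
  rw [hlen] at h1
  simp only [Int.toNat_natCast] at h1
  rw [← h1]
  apply List.map_congr_left
  intro j hj
  rw [PySem.List.mem_pyRange_one] at hj
  have hj0 : (0 : Int) ≤ j := le_trans (Int.natCast_nonneg x) hj.1
  rw [PySem.List.pyGetD_eq_getElem _ _ hj0 (by omega),
      PySem.List.pyGetD_eq_getElem _ _ hj0 (by simpa [hlen] using hj.2)]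
  exact (List.getElem_take).symm

-- per-suffix count, processed back to front (exactly B's traversal order)
def cnt (b : List Int) : Nat → Int
  | 0 => 0
  | k + 1 => cnt b k + ind (b.drop k)

-- B's loop invariant: folding indices k-1 … 0 with t = kad (b.drop k) lands on (ans + cnt b k, kad b)
theorem foldB (a : List Int) (m : Nat) (hm : m ≤ a.length) (b : List Int) (hb : b = a.take m) :
    ∀ (k : Nat), k ≤ m → ∀ ans : Int,
      (PySem.List.pyRange ((k : Int) - 1) (-1) (-1)).foldl
        (fun (p : Int × Int) x =>
          let t := PySem.List.pyGetD a x 0 + (if 0 < p.2 then p.2 else 0)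
          (p.1 + (if 4 ≤ t then 1 else 0), t))
        (ans, kad (b.drop k)) = (ans + cnt b k, kad b) := by
  intro k
  induction k with
  | zero =>
    intro _ ans
    rw [PySem.List.pyRange_neg_one_eq_nil (by omega)]
    simp [cnt]
  | succ k ih =>
    intro hk ans
    have hbl : b.length = m := by simp [hb, List.length_take]; omega
    have hdrop : b.drop k = b[k] :: b.drop (k + 1) := by
      rw [List.drop_eq_getElem_cons (by omega)]
    have hget : PySem.List.pyGetD a (k : Int) 0 = b[k]'(by omega) := by
      rw [PySem.List.pyGetD_natCast, List.getD_eq_getElem a 0 (by omega : k < a.length)]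
      simp [hb, List.getElem_take]
    have hcons : PySem.List.pyRange ((k : Int) + 1 - 1) (-1) (-1)
        = (k : Int) :: PySem.List.pyRange ((k : Int) - 1) (-1) (-1) := by
      have : ((k : Int) + 1 - 1) = (k : Int) := by ring
      rw [this, PySem.List.pyRange_neg_one_cons (by omega)]
    push_cast
    rw [hcons, List.foldl_cons]
    simp only []
    have hstep : PySem.List.pyGetD a (k : Int) 0
        + (if 0 < kad (b.drop (k + 1)) then kad (b.drop (k + 1)) else 0) = kad (b.drop k) := by
      rw [hdrop, kad, hget]
    rw [hstep]
    have := ih (by omega) (ans + (if 4 ≤ kad (b.drop k) then 1 else 0))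
    rw [this]
    have hne : b.drop k ≠ [] := by
      apply List.ne_nil_of_length_pos
      simp [hbl]
      omega
    have : cnt b (k + 1) = cnt b k + ind (b.drop k) := rfl
    rw [this, ind]
    simp only [hne, ne_eq, not_false_iff, true_and, Prod.mk.injEq]
    exact ⟨by ring, trivial⟩

-- A's loop equals the same count, taken front to back
theorem foldA (a : List Int) (m : Nat) (hm : m ≤ a.length) (b : List Int) (hb : b = a.take m) :
    ∀ (k : Nat), k ≤ m →
      (PySem.List.pyRange 0 (k : Int) 1).foldl
        (fun ans x => funcInner a (PySem.List.pyRange x (m : Int) 1) 0 ans) 0 = cnt b k := by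
  intro k
  induction k with
  | zero => simp [PySem.List.pyRange_one_eq_nil, cnt]
  | succ k ih =>
    intro hk
    have hbl : b.length = m := by simp [hb, List.length_take]; omega
    have : ((k : Int) + 1) = (k : Int) + 1 := rfl
    push_cast
    rw [PySem.List.pyRange_one_succ_right (by positivity), List.foldl_append, ih (by omega)]
    simp only [List.foldl_cons, List.foldl_nil]
    rw [funcInner_add, funcInner_eq_inner1,
        map_pyGetD_eq_drop a m k hm (by omega), ← hb, inner1_eq_ind]
    have hne : b.drop k ≠ [] := by
      apply List.ne_nil_of_length_pos
      simp [hbl]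
      omega
    have : cnt b (k + 1) = cnt b k + ind (b.drop k) := rfl
    rw [this, ind]
    simp only [hne, ne_eq, not_false_iff, true_and, zero_add]

-- ===== VERDICT (by name: the statement is the Claim_ definition above) =====
theorem func_spec : Claim_equal_func := by
  intro n a _ hpre
  unfold Pre_func at hpre
  unfold Spec_func func func_alt
  by_cases hn : n ≤ 0
  · rw [PySem.List.pyRange_one_eq_nil hn, PySem.List.pyRange_neg_one_eq_nil (by omega)]
    rfl
  · have hm : ((n.toNat : Nat) : Int) = n := Int.toNat_of_nonneg (by omega)
    have hmlen : n.toNat ≤ a.length := by omega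
    have h0 : kad ((a.take n.toNat).drop n.toNat) = 0 := by
      rw [List.drop_eq_nil_of_le (by simp [List.length_take])]
      rfl
    have hB := foldB a n.toNat hmlen (a.take n.toNat) rfl n.toNat (le_refl _) 0
    rw [h0] at hB
    have hA := foldA a n.toNat hmlen (a.take n.toNat) rfl n.toNat (le_refl _)
    rw [← hm, hA, hB]
    simp
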